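-- pv_equiv track=rewrite | github.com/Makivay/PythonLabs9S | graph.py | some_wtf_with_weights_table
-- ===== SOURCE A (Python) =====
-- def some_wtf_with_weights_table(table, treshhold):
--     heavy_peaks = []
--     for peak_number in range(len(table)):
--         peak_row = table[peak_number]
--         weights_sum = 0
--         for weight in peak_row:
--             weights_sum += weight
--         peak_column = [table[x][peak_number] for x in range(len(table))]
--         for weight in peak_column:
--             weights_sum += weight
--         if weights_sum >= treshhold:
--             heavy_peaks.append(peak_number)
--     return heavy_peaks
-- ===== SOURCE B (Python) =====
-- def some_wtf_with_weights_table(table, treshhold):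
--     n = len(table)
--     rowsum = [sum(row) for row in table]
--     colsum = [0] * n
--     for row in table:
--         colsum = [c + w for c, w in zip(colsum, row)]
--     return [peak for peak in range(n) if rowsum[peak] + colsum[peak] >= treshhold]
-- ===== Notes on version B (the rewrite author's own statement) =====
-- stated objective: alternative
-- what changed: Replaces A's per-peak column gather (an inner comprehension re-indexing the whole table for every peak) with one precomputed row-sum list and a column-sum vector built by elementwise zip-accumulation over the rows, followed by a single threshold pass.
import Mathlib
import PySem

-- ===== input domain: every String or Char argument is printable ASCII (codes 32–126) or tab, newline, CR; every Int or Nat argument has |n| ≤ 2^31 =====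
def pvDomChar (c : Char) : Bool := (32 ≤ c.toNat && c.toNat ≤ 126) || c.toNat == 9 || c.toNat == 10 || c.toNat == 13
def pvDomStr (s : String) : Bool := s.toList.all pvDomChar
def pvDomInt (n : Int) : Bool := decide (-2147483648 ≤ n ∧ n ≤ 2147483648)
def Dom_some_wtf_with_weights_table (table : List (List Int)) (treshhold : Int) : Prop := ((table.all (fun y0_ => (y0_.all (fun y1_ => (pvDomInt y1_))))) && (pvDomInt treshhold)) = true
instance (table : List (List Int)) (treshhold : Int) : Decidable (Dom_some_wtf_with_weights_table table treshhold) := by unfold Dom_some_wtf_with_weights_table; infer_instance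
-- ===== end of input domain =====

-- B computes the same heavy-peak list via precomputed row sums and a zip-accumulated column-sum
-- vector instead of A's per-peak column comprehension; alternative decomposition, same O(n^2) cost.

-- ===== PORT A =====
def some_wtf_with_weights_table (table : List (List Int)) (treshhold : Int) : List Int :=
  (List.range table.length).foldl (fun heavy_peaks peak_number =>
    let peak_row := table.getD peak_number []
    let weights_sum : Int := peak_row.foldl (fun s w => s + w) 0
    let peak_column := (List.range table.length).map (fun x => (table.getD x []).getD peak_number 0)
    let weights_sum := peak_column.foldl (fun s w => s + w) weights_sum
    if weights_sum ≥ treshhold then heavy_peaks ++ [(peak_number : Int)] else heavy_peaks) []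

-- ===== PORT B =====
def some_wtf_with_weights_table_alt (table : List (List Int)) (treshhold : Int) : List Int :=
  let n := table.length
  let rowsum := table.map (fun row => row.foldl (fun s w => s + w) 0)
  let colsum := table.foldl (fun cs row => List.zipWith (fun c w => c + w) cs row)
    (List.replicate n (0 : Int))
  (List.range n).foldl (fun acc peak =>
    if rowsum.getD peak 0 + colsum.getD peak 0 ≥ treshhold then acc ++ [(peak : Int)] else acc) []

-- ===== PRECONDITION & SPEC =====
-- Pre_ excludes ragged tables (some row shorter than the number of rows), on which A's column
-- gather table[x][peak_number] raises IndexError (and B's rowsum[peak]/colsum[peak] does too).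
def Pre_some_wtf_with_weights_table (table : List (List Int)) (treshhold : Int) : Prop :=
  ∀ row ∈ table, table.length ≤ row.length
instance (table : List (List Int)) (treshhold : Int) : Decidable (Pre_some_wtf_with_weights_table table treshhold) := by unfold Pre_some_wtf_with_weights_table; infer_instance

def pvWitness_some_wtf_with_weights_table : List (List Int) × Int := ([[1, 2], [3, 4]], 5)

def Spec_some_wtf_with_weights_table (table : List (List Int)) (treshhold : Int) (out : List Int) : Prop := out = some_wtf_with_weights_table_alt table treshhold
instance (table : List (List Int)) (treshhold : Int) (out : List Int) : Decidable (Spec_some_wtf_with_weights_table table treshhold out) := by unfold Spec_some_wtf_with_weights_table; infer_instance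

-- ===== CLAIM (what is proved, stated in full; the proofs are below) =====
def Claim_equal_some_wtf_with_weights_table : Prop := ∀ (table : List (List Int)) (treshhold : Int), Dom_some_wtf_with_weights_table table treshhold → Pre_some_wtf_with_weights_table table treshhold → Spec_some_wtf_with_weights_table table treshhold (some_wtf_with_weights_table table treshhold)

-- ===== LEMMAS AND PROOFS =====

theorem pv_foldl_add_int (l : List Int) (c : Int) : l.foldl (fun s w => s + w) c = c + l.foldl (fun s w => s + w) 0 := by
  induction l generalizing c with
  | nil => simp
  | cons h t ih => simp only [List.foldl_cons]; rw [ih (c + h), ih (0 + h)]; ring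

-- column accumulator invariant
theorem pv_colsum_getD (table : List (List Int)) (acc : List Int) (j : ℕ)
    (hj : j < acc.length) (hrows : ∀ row ∈ table, acc.length ≤ row.length) :
    (table.foldl (fun cs row => List.zipWith (fun c w => c + w) cs row) acc).getD j 0
      = acc.getD j 0 + (table.map (fun row => row.getD j 0)).foldl (fun s w => s + w) 0 := by
  induction table generalizing acc with
  | nil => simp
  | cons r t ih =>
    have hr : acc.length ≤ r.length := hrows r (by simp)
    have hlen : (List.zipWith (fun c w : Int => c + w) acc r).length = acc.length := by
      simp [List.length_zipWith]; omega
    have hj' : j < (List.zipWith (fun c w : Int => c + w) acc r).length := by omega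
    simp only [List.foldl_cons, List.map_cons]
    rw [ih _ hj' (by intro row hrow; rw [hlen]; exact hrows row (List.mem_cons_of_mem _ hrow))]
    have hzip : (List.zipWith (fun c w : Int => c + w) acc r).getD j 0 = acc.getD j 0 + r.getD j 0 := by
      have hjr : j < r.length := lt_of_lt_of_le hj hr
      rw [List.getD_eq_getElem _ _ hj', List.getD_eq_getElem _ _ hj, List.getD_eq_getElem _ _ hjr]
      simp [List.getElem_zipWith]
    rw [hzip, pv_foldl_add_int _ (0 + r.getD j 0)]
    ring

-- A's per-peak column list equals the map over rows
theorem pv_column_eq (table : List (List Int)) (peak : ℕ) :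
    (List.range table.length).map (fun x => (table.getD x []).getD peak 0)
      = table.map (fun row => row.getD peak 0) := by
  apply List.ext_getElem
  · simp
  · intro i h1 h2
    simp only [List.getElem_map, List.getElem_range]
    rw [List.getD_eq_getElem table _ (by simpa using h2)]

theorem pv_cond_eq (table : List (List Int)) (peak : ℕ) (hpk : peak < table.length)
    (hrows : ∀ row ∈ table, table.length ≤ row.length) :
    (table.getD peak []).foldl (fun s w => s + w) 0
      + ((List.range table.length).map (fun x => (table.getD x []).getD peak 0)).foldl (fun s w => s + w) 0
      = (table.map (fun row => row.foldl (fun s w => s + w) 0)).getD peak 0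
        + (table.foldl (fun cs row => List.zipWith (fun c w => c + w) cs row)
            (List.replicate table.length (0 : Int))).getD peak 0 := by
  rw [pv_column_eq]
  rw [pv_colsum_getD table _ peak (by simpa using hpk) (by simpa using hrows)]
  have hrs : (table.map (fun row => row.foldl (fun s w => s + w) 0)).getD peak 0
      = (table.getD peak []).foldl (fun s w => s + w) 0 := by
    rw [List.getD_eq_getElem _ _ (by simpa using hpk), List.getD_eq_getElem _ _ hpk]
    simp
  rw [hrs]
  simp

-- ===== VERDICT (by name: the statement is the Claim_ definition above) =====
theorem some_wtf_with_weights_table_spec : Claim_equal_some_wtf_with_weights_table := by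
  intro table treshhold _ hpre
  unfold Spec_some_wtf_with_weights_table some_wtf_with_weights_table some_wtf_with_weights_table_alt
  simp only []
  apply PySem.List.foldl_congr_mem
  intro acc peak hmem
  have hpk : peak < table.length := by simpa using List.mem_range.mp hmem
  have h := pv_cond_eq table peak hpk hpre
  rw [pv_foldl_add_int]
  congr 1
  rw [ge_iff_le, ge_iff_le, h]
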